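-- pv_equiv track=rewrite | github.com/pdurlej/ia-presenter-know-how | skills/ia-presenter-deck/scripts/presentation_system.py | remove_decorative_image
-- ===== SOURCE A (Python) =====
-- IMAGE_EXTENSIONS = (".png", ".jpg", ".jpeg", ".webp", ".gif", ".tiff", ".bmp")
--
-- IMAGE_ATTR_KEYS = {
--     "background",
--     "filter",
--     "opacity",
--     "size",
--     "x",
--     "y",
--     "title",
--     "caption",
-- }
--
-- def line_type(raw: str) -> str:
--     stripped = raw.strip()
--     if not stripped:
--         return "blank"
--
--     if raw.startswith("\t"):
--         visible = stripped
--         if visible.startswith("|"):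
--             return "table"
--         if visible.startswith(">"):
--             return "quote"
--         return "visible"
--
--     if stripped.startswith("#"):
--         return "heading"
--     if stripped.startswith("|"):
--         return "table"
--     if is_image_reference(stripped):
--         return "image"
--     if is_attribute_line(stripped):
--         return "attribute"
--     return "hidden"
--
-- def is_image_reference(text: str) -> bool:
--     lower = text.lower()
--     if lower.startswith(("http://", "https://", "/")) and lower.endswith(IMAGE_EXTENSIONS):
--         return True
--     return False
--
-- def is_attribute_line(text: str) -> bool:
--     if ":" not in text:
--         return False
--     key = text.split(":", 1)[0].strip().lower()
--     return key in IMAGE_ATTR_KEYS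
--
-- def remove_decorative_image(slide_lines: list[str]) -> list[str]:
--     new_lines: list[str] = []
--     skipping = False
--     removed = False
--     for raw in slide_lines:
--         kind = line_type(raw)
--         if kind == "image" and not removed:
--             skipping = True
--             removed = True
--             continue
--         if skipping and kind == "attribute":
--             continue
--         if skipping and kind == "blank":
--             skipping = False
--             continue
--         skipping = False
--         new_lines.append(raw)
--     return trim_extra_blank_lines(new_lines)
--
-- def trim_extra_blank_lines(lines: list[str]) -> list[str]:
--     trimmed: list[str] = []
--     previous_blank = False
--     for raw in lines:
--         is_blank = not raw.strip()
--         if is_blank and previous_blank: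
--             continue
--         trimmed.append(raw)
--         previous_blank = is_blank
--     while trimmed and not trimmed[0].strip():
--         trimmed.pop(0)
--     while trimmed and not trimmed[-1].strip():
--         trimmed.pop()
--     return trimmed
-- ===== SOURCE B (Python) =====
-- IMAGE_EXTENSIONS = (".png", ".jpg", ".jpeg", ".webp", ".gif", ".tiff", ".bmp")
--
-- IMAGE_ATTR_KEYS = {
--     "background", "filter", "opacity", "size", "x", "y", "title", "caption",
-- }
--
-- # module helpers, unchanged from the original module context
-- def line_type(raw: str) -> str:
--     stripped = raw.strip()
--     if not stripped:
--         return "blank"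
--     if raw.startswith("\t"):
--         visible = stripped
--         if visible.startswith("|"):
--             return "table"
--         if visible.startswith(">"):
--             return "quote"
--         return "visible"
--     if stripped.startswith("#"):
--         return "heading"
--     if stripped.startswith("|"):
--         return "table"
--     if is_image_reference(stripped):
--         return "image"
--     if is_attribute_line(stripped):
--         return "attribute"
--     return "hidden"
--
-- def is_image_reference(text: str) -> bool:
--     lower = text.lower()
--     if lower.startswith(("http://", "https://", "/")) and lower.endswith(IMAGE_EXTENSIONS):
--         return True
--     return False
--
-- def is_attribute_line(text: str) -> bool:
--     if ":" not in text:
--         return False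
--     key = text.split(":", 1)[0].strip().lower()
--     return key in IMAGE_ATTR_KEYS
--
-- def _tidy(lines):
--     # drop leading/trailing blank lines and collapse each inner blank run
--     # to its first blank line, in one pass with a pending slot
--     out = []
--     pending = None
--     for raw in lines:
--         if not raw.strip():
--             if pending is None:
--                 pending = raw
--         else:
--             if out and pending is not None:
--                 out.append(pending)
--             out.append(raw)
--             pending = None
--     return out
--
-- def remove_decorative_image(slide_lines: list[str]) -> list[str]:
--     for i, raw in enumerate(slide_lines):
--         if line_type(raw) == "image":
--             j = i + 1
--             while j < len(slide_lines) and line_type(slide_lines[j]) == "attribute":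
--                 j += 1
--             if j < len(slide_lines) and line_type(slide_lines[j]) == "blank":
--                 j += 1
--             return _tidy(slide_lines[:i] + slide_lines[j:])
--     return _tidy(slide_lines)
-- ===== Notes on version B (the rewrite author's own statement) =====
-- stated objective: alternative
-- what changed: B replaces A's stateful skipping/removed flag loop by locating the first image line and splicing out it, the following attribute run and at most one blank, and replaces A's three-pass trim (collapse, pop leading, pop trailing) by a one-pass tidy with a pending-blank slot.
import Mathlib
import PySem

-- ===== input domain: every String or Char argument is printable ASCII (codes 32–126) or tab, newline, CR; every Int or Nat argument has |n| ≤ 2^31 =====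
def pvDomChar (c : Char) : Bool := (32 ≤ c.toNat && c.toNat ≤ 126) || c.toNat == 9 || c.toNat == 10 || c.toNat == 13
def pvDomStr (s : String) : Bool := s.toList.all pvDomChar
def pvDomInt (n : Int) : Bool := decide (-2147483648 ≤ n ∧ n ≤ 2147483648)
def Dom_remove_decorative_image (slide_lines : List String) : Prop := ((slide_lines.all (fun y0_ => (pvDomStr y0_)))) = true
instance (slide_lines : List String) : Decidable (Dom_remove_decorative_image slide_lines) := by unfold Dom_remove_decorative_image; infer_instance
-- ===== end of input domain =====

-- B keeps A's module helpers (line_type & co., shared below) but removes the decorative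
-- block by locating the first image line and splicing, and trims in one pass; return values are equal.

-- ===== PORT A =====
-- module helpers shared by both ports (identical module context in Source A and Source B)
def pyIsImageReference (text : String) : Bool :=
  let lower := PySem.Str.lower text
  if (PySem.Str.startswith lower "http://" || PySem.Str.startswith lower "https://" ||
      PySem.Str.startswith lower "/")
     && (PySem.Str.endswith lower ".png" || PySem.Str.endswith lower ".jpg" ||
         PySem.Str.endswith lower ".jpeg" || PySem.Str.endswith lower ".webp" ||
         PySem.Str.endswith lower ".gif" || PySem.Str.endswith lower ".tiff" ||
         PySem.Str.endswith lower ".bmp") then true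
  else false

def pyIsAttributeLine (text : String) : Bool :=
  if !(PySem.Str.isIn ":" text) then false
  else
    let key := PySem.Str.lower (PySem.Str.strip ((((PySem.Str.splitMax? text ":" 1).getD []).headD "")))
    -- 'key in IMAGE_ATTR_KEYS': membership in the literal set
    (PySem.Set.ofList ["background", "filter", "opacity", "size", "x", "y", "title", "caption"]).contains key

def pyLineType (raw : String) : String :=
  let stripped := PySem.Str.strip raw
  if stripped == "" then "blank"
  else if PySem.Str.startswith raw "\t" then
    let visible := stripped
    if PySem.Str.startswith visible "|" then "table"
    else if PySem.Str.startswith visible ">" then "quote"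
    else "visible"
  else if PySem.Str.startswith stripped "#" then "heading"
  else if PySem.Str.startswith stripped "|" then "table"
  else if pyIsImageReference stripped then "image"
  else if pyIsAttributeLine stripped then "attribute"
  else "hidden"

def isBlankLine (raw : String) : Bool := PySem.Str.strip raw == ""

-- A's main loop: state (skipping, removed), appended lines as the cons spine
def removeLoopA : List String → Bool → Bool → List String
  | [], _, _ => []
  | raw :: rest, skipping, removed =>
    let kind := pyLineType raw
    if kind == "image" && !removed then removeLoopA rest true true
    else if skipping && kind == "attribute" then removeLoopA rest skipping removed
    else if skipping && kind == "blank" then removeLoopA rest false removed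
    else raw :: removeLoopA rest false removed

-- A's trim_extra_blank_lines: collapse pass, then pop leading, then pop trailing
def collapseBlanks : List String → Bool → List String
  | [], _ => []
  | raw :: rest, prev =>
    let b := isBlankLine raw
    if b && prev then collapseBlanks rest prev
    else raw :: collapseBlanks rest b

def popLeadingBlanks : List String → List String
  | [] => []
  | x :: r => if isBlankLine x then popLeadingBlanks r else x :: r

def popTrailingBlanks : List String → List String
  | [] => []
  | x :: r =>
    match popTrailingBlanks r with
    | [] => if isBlankLine x then [] else [x]
    | t => x :: t

def trimExtraBlankLines (lines : List String) : List String :=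
  popTrailingBlanks (popLeadingBlanks (collapseBlanks lines false))

def remove_decorative_image (slide_lines : List String) : List String :=
  trimExtraBlankLines (removeLoopA slide_lines false false)

-- ===== PORT B =====
-- Source B's scan for the first image line; prefix kept as the cons spine, then the
-- attribute run is skipped (the j-cursor while loop) and at most one blank dropped
def stripDecorB : List String → List String
  | [] => []
  | raw :: rest =>
    if pyLineType raw == "image" then
      match rest.dropWhile (fun l => pyLineType l == "attribute") with
      | [] => []
      | t :: ts => if pyLineType t == "blank" then ts else t :: ts
    else raw :: stripDecorB rest

-- Source B's _tidy: one pass, out nonempty phase, pending = first blank of the current run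
def tidyGoB : List String → Option String → List String
  | [], _ => []
  | raw :: rest, pending =>
    if isBlankLine raw then tidyGoB rest (some (pending.getD raw))
    else
      match pending with
      | some b => b :: raw :: tidyGoB rest none
      | none => raw :: tidyGoB rest none

-- Source B's _tidy, out-still-empty phase (leading blanks never flushed)
def tidyB : List String → List String
  | [] => []
  | raw :: rest => if isBlankLine raw then tidyB rest else raw :: tidyGoB rest none

def remove_decorative_image_alt (slide_lines : List String) : List String :=
  tidyB (stripDecorB slide_lines)

-- ===== PRECONDITION & SPEC =====
def Spec_remove_decorative_image (slide_lines : List String) (out : List String) : Prop := out = remove_decorative_image_alt slide_lines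
instance (slide_lines : List String) (out : List String) : Decidable (Spec_remove_decorative_image slide_lines out) := by unfold Spec_remove_decorative_image; infer_instance

-- ===== CLAIM (what is proved, stated in full; the proofs are below) =====
def Claim_equal_remove_decorative_image : Prop := ∀ (slide_lines : List String), Dom_remove_decorative_image slide_lines → Spec_remove_decorative_image slide_lines (remove_decorative_image slide_lines)

-- ===== LEMMAS AND PROOFS =====

-- once the image is removed and skipping is off, A's loop appends everything
theorem loopA_done : ∀ r : List String, removeLoopA r false true = r := by
  intro r
  induction r with
  | nil => rfl
  | cons x t ih => simp [removeLoopA, ih]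

-- A's skipping phase equals B's dropWhile-attributes-then-one-blank splice
theorem loopA_skip : ∀ r : List String,
    removeLoopA r true true =
      (match r.dropWhile (fun l => pyLineType l == "attribute") with
       | [] => []
       | t :: ts => if pyLineType t == "blank" then ts else t :: ts) := by
  intro r
  induction r with
  | nil => rfl
  | cons x t ih =>
    by_cases hA : pyLineType x == "attribute"
    · simp [removeLoopA, List.dropWhile, hA, ih]
    · by_cases hB : pyLineType x == "blank"
      · simp [removeLoopA, List.dropWhile, hA, hB, loopA_done]
      · simp [removeLoopA, List.dropWhile, hA, hB, loopA_done]

-- before trimming, A's loop output equals B's splice output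
theorem loop_eq_strip : ∀ ls : List String, removeLoopA ls false false = stripDecorB ls := by
  intro ls
  induction ls with
  | nil => rfl
  | cons x t ih =>
    by_cases hI : pyLineType x == "image"
    · simp [removeLoopA, stripDecorB, hI, loopA_skip]
    · simp [removeLoopA, stripDecorB, hI, ih]

theorem popTrail_cons_nonblank (x : String) (L : List String) (hx : isBlankLine x = false) :
    popTrailingBlanks (x :: L) = x :: popTrailingBlanks L := by
  cases h : popTrailingBlanks L with
  | nil => simp [popTrailingBlanks, h, hx]
  | cons a b => simp [popTrailingBlanks, h]

-- the collapse pass followed by the trailing pop equals B's pending-slot pass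
theorem collapse_tidyGo : ∀ r : List String,
    (popTrailingBlanks (collapseBlanks r false) = tidyGoB r none) ∧
    (∀ b : String, isBlankLine b = true →
      popTrailingBlanks (b :: collapseBlanks r true) = tidyGoB r (some b)) := by
  intro r
  induction r with
  | nil =>
    refine ⟨rfl, ?_⟩
    intro b hb
    simp [popTrailingBlanks, collapseBlanks, tidyGoB, hb]
  | cons x t ih =>
    constructor
    · by_cases hx : isBlankLine x = true
      · simpa [collapseBlanks, tidyGoB, hx] using ih.2 x hx
      · simp only [Bool.not_eq_true] at hx
        simp [collapseBlanks, tidyGoB, hx, popTrail_cons_nonblank _ _ hx, ih.1]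
    · intro b hb
      by_cases hx : isBlankLine x = true
      · simpa [collapseBlanks, tidyGoB, hx] using ih.2 b hb
      · simp only [Bool.not_eq_true] at hx
        rw [show collapseBlanks (x :: t) true = x :: collapseBlanks t false by
              simp [collapseBlanks, hx]]
        cases h2 : tidyGoB t none <;>
          simp [popTrailingBlanks, ih.1, tidyGoB, hx, h2]

theorem collapse_true_tidy : ∀ r : List String,
    popTrailingBlanks (collapseBlanks r true) = tidyB r := by
  intro r
  induction r with
  | nil => rfl
  | cons x t ih =>
    by_cases hx : isBlankLine x = true
    · simpa [collapseBlanks, tidyB, hx] using ih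
    · simp only [Bool.not_eq_true] at hx
      simp [collapseBlanks, tidyB, hx, popTrail_cons_nonblank _ _ hx, (collapse_tidyGo t).1]

theorem popLead_collapse_true : ∀ r : List String,
    popLeadingBlanks (collapseBlanks r true) = collapseBlanks r true := by
  intro r
  induction r with
  | nil => rfl
  | cons x t ih =>
    by_cases hx : isBlankLine x = true
    · simpa [collapseBlanks, hx] using ih
    · simp only [Bool.not_eq_true] at hx
      simp [collapseBlanks, popLeadingBlanks, hx]

-- A's three-pass trim equals B's one-pass tidy
theorem trim_eq_tidy : ∀ ls : List String, trimExtraBlankLines ls = tidyB ls := by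
  intro ls
  cases ls with
  | nil => rfl
  | cons x t =>
    by_cases hx : isBlankLine x = true
    · simp [trimExtraBlankLines, collapseBlanks, popLeadingBlanks, hx,
            popLead_collapse_true, collapse_true_tidy, tidyB]
    · simp only [Bool.not_eq_true] at hx
      simp [trimExtraBlankLines, collapseBlanks, popLeadingBlanks, tidyB, hx,
            popTrail_cons_nonblank _ _ hx, (collapse_tidyGo t).1]

-- ===== VERDICT (by name: the statement is the Claim_ definition above) =====
theorem remove_decorative_image_spec : Claim_equal_remove_decorative_image := by
  intro ls _
  unfold Spec_remove_decorative_image remove_decorative_image remove_decorative_image_alt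
  rw [loop_eq_strip, trim_eq_tidy]
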